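-- pv_equiv track=rewrite | github.com/maurepass/metsoft_django | offers/models.py | string_from_list
-- ===== SOURCE A (Python) =====
-- def string_from_list(attr_list):
--     temp_dict = {}
--     end_str = ''
--
--     # sorting list by value
--     for index, item in enumerate(attr_list, start=1):
--         if item not in temp_dict:
--             temp_dict[item] = [index]
--         else:
--             temp_dict[item].append(index)
--
--     # making string from sorted list
--     for key in temp_dict:
--         end_str += '{}: '.format(key)
--         for value in temp_dict[key]:
--             end_str += '{},'.format(value)
--         end_str += '; '
--
--     return end_str
-- ===== SOURCE B (Python) =====
-- def string_from_list(attr_list):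
--     seen = set()
--     keys = []
--     for item in attr_list:
--         if item not in seen:
--             seen.add(item)
--             keys.append(item)
--     parts = []
--     for key in keys:
--         idx = ''.join('{},'.format(i) for i, x in enumerate(attr_list, 1) if x == key)
--         parts.append('{}: {}; '.format(key, idx))
--     return ''.join(parts)
-- ===== Notes on version B (the rewrite author's own statement) =====
-- stated objective: alternative
-- what changed: Replaces A's dict-of-index-lists grouping with a two-phase strategy: first dedup the values in first-appearance order (set + list), then for each distinct value re-scan the list with enumerate and join the matching 1-based indices; output assembled with join instead of += accumulation.
import Mathlib
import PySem

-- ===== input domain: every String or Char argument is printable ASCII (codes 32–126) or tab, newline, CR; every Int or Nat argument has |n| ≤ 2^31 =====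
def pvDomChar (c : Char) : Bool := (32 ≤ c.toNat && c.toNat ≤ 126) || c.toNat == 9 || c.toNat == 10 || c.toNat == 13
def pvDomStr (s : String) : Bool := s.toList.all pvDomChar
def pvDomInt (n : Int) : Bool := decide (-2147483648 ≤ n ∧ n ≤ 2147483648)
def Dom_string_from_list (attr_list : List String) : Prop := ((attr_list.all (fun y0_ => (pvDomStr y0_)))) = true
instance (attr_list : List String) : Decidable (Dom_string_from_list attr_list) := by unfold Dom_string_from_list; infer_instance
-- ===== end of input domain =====

-- B replaces A's dict-of-index-lists grouping by an ordered dedup of the values followed by one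
-- re-scan of the input per distinct value (alternative decomposition, same output).


-- ===== PORT A =====
def string_from_list (attr_list : List String) : String :=
  let temp_dict : PySem.Dict String (List Int) :=
    (PySem.List.enumerate attr_list 1).foldl (fun d p =>
      if d.contains p.2 = false then d.insert p.2 [p.1]
      else d.insert p.2 (d.getD p.2 [] ++ [p.1])) PySem.Dict.empty
  temp_dict.items.foldl (fun s kv =>
    let s1 := s ++ kv.1 ++ ": "
    let s2 := kv.2.foldl (fun t v => t ++ PySem.Int.toStr v ++ ",") s1
    s2 ++ "; ") ""

-- ===== PORT B =====
def string_from_list_alt (attr_list : List String) : String :=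
  let st := attr_list.foldl (fun (p : PySem.Set String × List String) item =>
      if PySem.Set.contains p.1 item then p
      else (PySem.Set.add p.1 item, p.2 ++ [item])) (PySem.Set.empty, [])
  PySem.Str.join "" (st.2.map (fun key =>
    key ++ ": " ++
      PySem.Str.join "" ((PySem.List.enumerate attr_list 1).filterMap
        (fun p => if p.2 == key then some (PySem.Int.toStr p.1 ++ ",") else none)) ++ "; "))

-- ===== PRECONDITION & SPEC =====
def Spec_string_from_list (attr_list : List String) (out : String) : Prop := out = string_from_list_alt attr_list
instance (attr_list : List String) (out : String) : Decidable (Spec_string_from_list attr_list out) := by unfold Spec_string_from_list; infer_instance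

-- ===== CLAIM (what is proved, stated in full; the proofs are below) =====
def Claim_equal_string_from_list : Prop := ∀ (attr_list : List String), Dom_string_from_list attr_list → Spec_string_from_list attr_list (string_from_list attr_list)

-- ===== LEMMAS AND PROOFS =====

-- A's dict-building step is exactly 'modify key [] (· ++ [index])'.
theorem pvStepA_eq (d : PySem.Dict String (List Int)) (p : Int × String) :
    (if d.contains p.2 = false then d.insert p.2 [p.1]
     else d.insert p.2 (d.getD p.2 [] ++ [p.1])) = d.modify p.2 [] (· ++ [p.1]) := by
  by_cases hc : d.contains p.2 = false
  · rw [if_pos hc]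
    show d.insert p.2 [p.1] = d.insert p.2 (d.getD p.2 [] ++ [p.1])
    rw [PySem.Dict.getD_of_not_contains d [] hc]
    rfl
  · rw [if_neg hc]
    rfl

theorem pvDictA_eq (attr_list : List String) :
    ((PySem.List.enumerate attr_list 1).foldl (fun d p =>
      if d.contains p.2 = false then d.insert p.2 [p.1]
      else d.insert p.2 (d.getD p.2 [] ++ [p.1])) PySem.Dict.empty)
    = (PySem.List.enumerate attr_list 1).foldl
        (fun d p => d.modify p.2 [] (· ++ [p.1])) PySem.Dict.empty := by
  have h : (fun (d : PySem.Dict String (List Int)) (p : Int × String) =>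
      if d.contains p.2 = false then d.insert p.2 [p.1]
      else d.insert p.2 (d.getD p.2 [] ++ [p.1]))
      = fun d p => d.modify p.2 [] (· ++ [p.1]) := by
    funext d p; exact pvStepA_eq d p
  rw [h]

-- keys of A's dict = first-appearance dedup of the input
theorem pvKeysA (attr_list : List String) :
    ((PySem.List.enumerate attr_list 1).foldl
        (fun d p => d.modify p.2 [] (· ++ [p.1])) (PySem.Dict.empty : PySem.Dict String (List Int))).keys
    = PySem.List.dedup attr_list := by
  rw [PySem.Dict.keys_foldl_modify_key (key := fun p : Int × String => p.2)]
  simp [PySem.List.map_snd_enumerate, PySem.List.dedup_eq_ofList]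
  rfl

theorem pvNodupKeysA (attr_list : List String) :
    ((PySem.List.enumerate attr_list 1).foldl
        (fun d p => d.modify p.2 [] (· ++ [p.1])) (PySem.Dict.empty : PySem.Dict String (List Int))).keys.Nodup := by
  rw [pvKeysA]; exact PySem.List.nodup_dedup attr_list

-- value stored at k = the 1-based indices of k, in order
theorem pvGetDA (attr_list : List String) (k : String) :
    ((PySem.List.enumerate attr_list 1).foldl
        (fun d p => d.modify p.2 [] (· ++ [p.1])) (PySem.Dict.empty : PySem.Dict String (List Int))).getD k []
    = ((PySem.List.enumerate attr_list 1).filter (fun p => p.2 == k)).map (·.1) := by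
  have h1 : (PySem.List.enumerate attr_list 1).foldl
      (fun d p => d.modify p.2 [] (· ++ [p.1])) (PySem.Dict.empty : PySem.Dict String (List Int))
      = ((PySem.List.enumerate attr_list 1).map Prod.swap).foldl
          (fun d q => d.modify q.1 [] (· ++ [q.2])) PySem.Dict.empty := by
    rw [List.foldl_map]
    rfl
  rw [h1, PySem.Dict.getD_foldl_modify_append]
  rw [List.filter_map, List.map_map]
  rw [PySem.Dict.getD_empty]
  rfl

-- string-accumulation fold = join of the mapped pieces
theorem pvFoldStr {α : Type} (l : List α) (f : α → String) (s : String) :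
    l.foldl (fun t x => t ++ f x) s = s ++ PySem.Str.join "" (l.map f) := by
  induction l generalizing s with
  | nil => simp [PySem.Str.join, PySem.Chars.join_nil]
  | cons a t ih =>
    have hj : PySem.Str.join "" (f a :: t.map f) = f a ++ PySem.Str.join "" (t.map f) := by
      cases ht : t.map f with
      | nil => simp [PySem.Str.join, PySem.Chars.join_singleton, PySem.Chars.join_nil]
      | cons b u => simp [PySem.Str.join, PySem.Chars.join_cons_cons]
    simp only [List.foldl_cons, List.map_cons, hj, ih, String.append_assoc]

-- A's whole output loop, over any items list
theorem pvFoldA (items : List (String × List Int)) (s : String) :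
    items.foldl (fun s kv =>
        (kv.2.foldl (fun t v => t ++ PySem.Int.toStr v ++ ",") (s ++ kv.1 ++ ": ")) ++ "; ") s
    = s ++ PySem.Str.join "" (items.map (fun kv =>
        kv.1 ++ ": " ++ PySem.Str.join "" (kv.2.map (fun v => PySem.Int.toStr v ++ ",")) ++ "; ")) := by
  have hinner : ∀ (vs : List Int) (t : String),
      vs.foldl (fun t v => t ++ PySem.Int.toStr v ++ ",") t
      = t ++ PySem.Str.join "" (vs.map (fun v => PySem.Int.toStr v ++ ",")) := by
    intro vs t
    have h : (fun (t : String) (v : Int) => t ++ PySem.Int.toStr v ++ ",")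
        = fun t v => t ++ (PySem.Int.toStr v ++ ",") := by
      funext t v; rw [String.append_assoc]
    rw [h, pvFoldStr]
  have h2 : (fun (s : String) (kv : String × List Int) =>
      (kv.2.foldl (fun t v => t ++ PySem.Int.toStr v ++ ",") (s ++ kv.1 ++ ": ")) ++ "; ")
      = fun s kv => s ++ (kv.1 ++ ": "
          ++ PySem.Str.join "" (kv.2.map (fun v => PySem.Int.toStr v ++ ",")) ++ "; ") := by
    funext s kv
    rw [hinner]
    simp [String.append_assoc]
  rw [h2, pvFoldStr]

-- B's dedup loop: starting from equal components, both components stay the running set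
theorem pvPairFold (xs : List String) (s : PySem.Set String) :
    xs.foldl (fun (p : PySem.Set String × List String) item =>
      if PySem.Set.contains p.1 item then p
      else (PySem.Set.add p.1 item, p.2 ++ [item])) (s, s)
    = (PySem.Set.update s xs, PySem.Set.update s xs) := by
  induction xs generalizing s with
  | nil => rfl
  | cons x t ih =>
    by_cases h : PySem.Set.contains s x
    · have hadd : PySem.Set.add s x = s := by
        simp only [PySem.Set.add]
        rw [if_pos (by simpa [PySem.Set.contains] using h)]
      simp only [List.foldl_cons, if_pos h]
      rw [show PySem.Set.update s (x :: t) = PySem.Set.update (PySem.Set.add s x) t from rfl, hadd]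
      exact ih s
    · have hadd : PySem.Set.add s x = s ++ [x] := by
        simp only [PySem.Set.add]
        rw [if_neg (by simpa [PySem.Set.contains] using h)]
      simp only [List.foldl_cons, if_neg h]
      rw [show PySem.Set.update s (x :: t) = PySem.Set.update (PySem.Set.add s x) t from rfl]
      rw [← hadd]
      exact ih (PySem.Set.add s x)

theorem pvFilterMapIf {α β : Type} (l : List α) (p : α → Bool) (f : α → β) :
    l.filterMap (fun x => if p x then some (f x) else none) = (l.filter p).map f := by
  induction l with
  | nil => rfl
  | cons a t ih => by_cases h : p a <;> simp [h, ih]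

-- ===== VERDICT (by name: the statement is the Claim_ definition above) =====
theorem string_from_list_spec : Claim_equal_string_from_list := by
  intro attr_list _
  unfold Spec_string_from_list
  simp only [string_from_list, string_from_list_alt]
  rw [pvDictA_eq, pvFoldA]
  rw [PySem.Dict.items_eq_map_keys _ (pvNodupKeysA attr_list) ([] : List Int)]
  rw [pvKeysA, List.map_map]
  rw [show (PySem.Set.empty, ([] : List String)) = ((([] : PySem.Set String)), ([] : List String))
      from rfl]
  rw [pvPairFold]
  have hupd : PySem.Set.update ([] : PySem.Set String) attr_list = PySem.List.dedup attr_list := by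
    rw [PySem.List.dedup_eq_ofList]; rfl
  simp only [hupd]
  simp only [show ∀ s : String, "" ++ s = s from fun s => by simp]
  refine congrArg (PySem.Str.join "") (List.map_congr_left ?_)
  intro k hk
  simp only [Function.comp]
  rw [pvGetDA, pvFilterMapIf, List.map_map]
  rfl
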